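-- pv_equiv track=rewrite | github.com/tsuru7/algorithm-study | AtCoder/ABC/201-300/ABC259/D.py | solve
-- ===== SOURCE A (Python) =====
-- from collections import deque
--
-- def bfs(start, goal, graph):
--     queue = deque()
--     n = len(graph)
--     visited = [False for _ in range(n)]
--     queue.append(start)
--     visited[start] = True
--     while len(queue) > 0:
--         u = queue.popleft()
--         for v in graph[u]:
--             if v == goal:
--                 return True
--             if visited[v]:
--                 continue
--             queue.append(v)
--             visited[v] = True
--     return False
--
-- def solve(n,sx,sy,tx,ty,circles):
--     if n == 1:
--         return 'Yes'
--     for i in range(n):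
--         cx, cy, r = circles[i]
--         if (sx-cx)**2+(sy-cy)**2 == r**2:
--             start = i
--         if (tx-cx)**2+(ty-cy)**2 == r**2:
--             goal = i
--     graph = [[] for _ in range(n)]
--     for i in range(n):
--         cix, ciy, ri = circles[i]
--         for j in range(n):
--             if i == j:
--                 continue
--             cjx, cjy, rj = circles[j]
--             if (ri-rj)**2 <= (cix-cjx)**2 + (ciy-cjy)**2 <= (ri+rj)**2:
--                 graph[i].append(j)
--                 graph[j].append(i)
--
--     if bfs(start, goal, graph):
--         return 'Yes'
--     else:
--         return 'No'
-- ===== SOURCE B (Python) =====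
-- def solve(n, sx, sy, tx, ty, circles):
--     if n == 1:
--         return 'Yes'
--     for i in range(n):
--         cx, cy, r = circles[i]
--         if (sx-cx)**2 + (sy-cy)**2 == r**2:
--             start = i
--         if (tx-cx)**2 + (ty-cy)**2 == r**2:
--             goal = i
--
--     def touch(i, j):
--         cix, ciy, ri = circles[i]
--         cjx, cjy, rj = circles[j]
--         d2 = (cix-cjx)**2 + (ciy-cjy)**2
--         return (ri-rj)**2 <= d2 <= (ri+rj)**2
--
--     # saturate the set of circles reachable from `start` (no adjacency lists, no queue)
--     reach = [False] * n
--     reach[start] = True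
--     changed = True
--     while changed:
--         changed = False
--         for i in range(n):
--             if not reach[i]:
--                 continue
--             for j in range(n):
--                 if j != i and not reach[j] and touch(i, j):
--                     reach[j] = True
--                     changed = True
--     # a walk of length >= 1 ends with an edge into `goal`
--     return 'Yes' if any(reach[u] and u != goal and touch(u, goal) for u in range(n)) else 'No'
-- ===== Notes on version B (the rewrite author's own statement) =====
-- stated objective: alternative
-- what changed: The adjacency-list construction plus queue-based BFS is replaced by a fixpoint saturation: a boolean reach array seeded at start is grown to the whole connected component by repeated rounds over the pairwise touching test (no graph, no queue, no visited bookkeeping), and the answer is 'Yes' iff some reachable circle other than goal touches goal - which reproduces BFS's walk-of-length-at-least-1 semantics (including the start==goal corner) without any special case.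
import Mathlib
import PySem

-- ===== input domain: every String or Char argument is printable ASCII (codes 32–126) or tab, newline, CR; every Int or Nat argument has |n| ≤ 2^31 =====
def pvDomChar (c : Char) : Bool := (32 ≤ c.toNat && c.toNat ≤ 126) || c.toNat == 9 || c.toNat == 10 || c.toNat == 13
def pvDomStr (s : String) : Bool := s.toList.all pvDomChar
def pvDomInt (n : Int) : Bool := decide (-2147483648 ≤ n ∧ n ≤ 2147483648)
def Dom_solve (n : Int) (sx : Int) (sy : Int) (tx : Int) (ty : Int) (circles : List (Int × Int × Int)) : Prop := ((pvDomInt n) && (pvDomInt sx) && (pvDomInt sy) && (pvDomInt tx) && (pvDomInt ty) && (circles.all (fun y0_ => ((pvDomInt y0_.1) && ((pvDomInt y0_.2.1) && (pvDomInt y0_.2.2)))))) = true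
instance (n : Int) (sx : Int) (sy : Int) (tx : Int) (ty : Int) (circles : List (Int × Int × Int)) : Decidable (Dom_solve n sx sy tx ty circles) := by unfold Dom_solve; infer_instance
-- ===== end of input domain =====

-- B replaces A's adjacency-lists-plus-BFS with a saturation (fixpoint) pass over a reachability
-- bit array — a genuinely different traversal; objective: alternative (not claimed faster).

-- ===== PORT A =====

-- The start/goal scan ('for i in range(n): ... start = i ... goal = i') is textually identical in
-- Source A and Source B, so both ports share this helper.  `none` models a raise (IndexError on circles[i],
-- or NameError when start/goal were never assigned — the latter shows up as a `none` component).
def scanStep (sx sy tx ty : Int) (circles : List (Int × Int × Int))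
    (acc : Option (Option Int × Option Int)) (i : Int) : Option (Option Int × Option Int) :=
  match acc with
  | none => none
  | some (s?, g?) =>
    match PySem.List.pyGet? circles i with
    | none => none
    | some (cx, cy, r) =>
      some ((if (sx-cx)^2+(sy-cy)^2 = r^2 then some i else s?),
            (if (tx-cx)^2+(ty-cy)^2 = r^2 then some i else g?))

def scanSG (n sx sy tx ty : Int) (circles : List (Int × Int × Int)) :
    Option (Option Int × Option Int) :=
  (PySem.List.pyRange 0 n 1).foldl (scanStep sx sy tx ty circles) (some (none, none))

-- A's inner-loop test '(ri-rj)**2 <= (cix-cjx)**2+(ciy-cjy)**2 <= (ri+rj)**2'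
-- (false where Python would raise IndexError; those inputs are outside Pre_solve)
def condA (circles : List (Int × Int × Int)) (i j : Int) : Bool :=
  match PySem.List.pyGet? circles i, PySem.List.pyGet? circles j with
  | some (cix, ciy, ri), some (cjx, cjy, rj) =>
    decide ((ri-rj)^2 ≤ (cix-cjx)^2+(ciy-cjy)^2 ∧ (cix-cjx)^2+(ciy-cjy)^2 ≤ (ri+rj)^2)
  | _, _ => false

-- graph[i].append(j); graph[j].append(i)
def addEdge (g : List (List Int)) (i j : Int) : List (List Int) :=
  (g.modify i.toNat (· ++ [j])).modify j.toNat (· ++ [i])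

def edgeStep (circles : List (Int × Int × Int)) (i : Int)
    (g : List (List Int)) (j : Int) : List (List Int) :=
  if i = j then g else if condA circles i j then addEdge g i j else g

def buildGraph (n : Int) (circles : List (Int × Int × Int)) : List (List Int) :=
  (PySem.List.pyRange 0 n 1).foldl
    (fun g i => (PySem.List.pyRange 0 n 1).foldl (edgeStep circles i) g)
    (List.replicate n.toNat ([] : List Int))

-- one neighbour of the popped vertex: 'if v == goal: return True; if visited[v]: continue; …'
def bfsStep (goal : Int) (st : Sum Bool (List Int × List Bool)) (v : Int) :
    Sum Bool (List Int × List Bool) :=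
  match st with
  | .inl b => .inl b
  | .inr (q, vis) =>
    if v = goal then .inl true
    else if (PySem.List.pyGet? vis v).getD false then .inr (q, vis)
    else .inr (q ++ [v], vis.set v.toNat true)

-- 'while len(queue) > 0: …'; the fuel only makes the loop total: 2*len(graph)+1 is proved
-- sufficient below (each enqueue marks a fresh vertex visited), so the 0-fuel branch is dead.
def bfsLoop (graph : List (List Int)) (goal : Int) :
    Nat → List Int → List Bool → Bool
  | 0, _, _ => false
  | fuel+1, queue, visited =>
    match queue with
    | [] => false
    | u :: rest =>
      match ((PySem.List.pyGet? graph u).getD []).foldl (bfsStep goal) (.inr (rest, visited)) with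
      | .inl b => b
      | .inr (q, vis) => bfsLoop graph goal fuel q vis

def bfs (start goal : Int) (graph : List (List Int)) : Bool :=
  bfsLoop graph goal (2 * graph.length + 1) [start]
    ((List.replicate graph.length false).set start.toNat true)

def solve (n : Int) (sx : Int) (sy : Int) (tx : Int) (ty : Int)
    (circles : List (Int × Int × Int)) : String :=
  if n = 1 then "Yes"
  else
    match scanSG n sx sy tx ty circles with
    | some (some start, some goal) =>
      if bfs start goal (buildGraph n circles) then "Yes" else "No"
    | _ => ""   -- Python raises NameError/IndexError here; excluded by Pre_solve

-- ===== PORT B =====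

-- Source B's 'touch(i, j)' (false where Python would raise IndexError; outside Pre_solve)
def touchB (circles : List (Int × Int × Int)) (i j : Int) : Bool :=
  match PySem.List.pyGet? circles i, PySem.List.pyGet? circles j with
  | some (cix, ciy, ri), some (cjx, cjy, rj) =>
    decide ((ri-rj)^2 ≤ (cix-cjx)^2+(ciy-cjy)^2 ∧ (cix-cjx)^2+(ciy-cjy)^2 ≤ (ri+rj)^2)
  | _, _ => false

-- one body of 'for j in range(n): if j != i and not reach[j] and touch(i, j): reach[j] = True; changed = True'
def satInner (circles : List (Int × Int × Int)) (i : Int)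
    (st : List Bool × Bool) (j : Int) : List Bool × Bool :=
  if j ≠ i ∧ ¬((PySem.List.pyGet? st.1 j).getD false = true) ∧ touchB circles i j = true
  then (st.1.set j.toNat true, true) else st

-- one full round: 'for i in range(n): if not reach[i]: continue; for j in range(n): …'
def satRound (n : Int) (circles : List (Int × Int × Int)) (st : List Bool × Bool) :
    List Bool × Bool :=
  (PySem.List.pyRange 0 n 1).foldl
    (fun st i =>
      if (PySem.List.pyGet? st.1 i).getD false then
        (PySem.List.pyRange 0 n 1).foldl (satInner circles i) st
      else st)
    st

-- 'while changed: changed = False; …'; the fuel only makes the loop total: n.toNat+1 rounds are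
-- proved sufficient below (a changed round strictly grows the reach set), so the 0-fuel branch is dead.
def satLoop (n : Int) (circles : List (Int × Int × Int)) :
    Nat → List Bool → List Bool
  | 0, r => r
  | fuel+1, r =>
    match satRound n circles (r, false) with
    | (r', ch) => if ch then satLoop n circles fuel r' else r'

def solve_alt (n : Int) (sx : Int) (sy : Int) (tx : Int) (ty : Int)
    (circles : List (Int × Int × Int)) : String :=
  if n = 1 then "Yes"
  else
    match scanSG n sx sy tx ty circles with
    | some (some start, some goal) =>
      let reach := satLoop n circles (n.toNat + 1)
        ((List.replicate n.toNat false).set start.toNat true)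
      if (PySem.List.pyRange 0 n 1).any (fun u =>
           (PySem.List.pyGet? reach u).getD false && decide (u ≠ goal) && touchB circles u goal)
      then "Yes" else "No"
    | _ => ""   -- Python raises NameError/IndexError here; excluded by Pre_solve

-- ===== PRECONDITION & SPEC =====

-- Exactly the inputs on which A returns: either n == 1 (immediate 'Yes'), or n ≥ 2 with the first
-- n circles present (else IndexError) and S and T each on some of those circles (else NameError).
def Pre_solve (n : Int) (sx : Int) (sy : Int) (tx : Int) (ty : Int)
    (circles : List (Int × Int × Int)) : Prop :=
  n = 1 ∨ (2 ≤ n ∧ n ≤ circles.length ∧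
    (∃ c ∈ circles.take n.toNat, (sx-c.1)^2+(sy-c.2.1)^2 = c.2.2^2) ∧
    (∃ c ∈ circles.take n.toNat, (tx-c.1)^2+(ty-c.2.1)^2 = c.2.2^2))
instance (n : Int) (sx : Int) (sy : Int) (tx : Int) (ty : Int) (circles : List (Int × Int × Int)) : Decidable (Pre_solve n sx sy tx ty circles) := by unfold Pre_solve; infer_instance

def pvWitness_solve : Int × Int × Int × Int × Int × (List (Int × Int × Int)) :=
  (2, 3, 0, -3, 0, [(0, 0, 3), (4, 0, 2)])

def Spec_solve (n : Int) (sx : Int) (sy : Int) (tx : Int) (ty : Int) (circles : List (Int × Int × Int)) (out : String) : Prop := out = solve_alt n sx sy tx ty circles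
instance (n : Int) (sx : Int) (sy : Int) (tx : Int) (ty : Int) (circles : List (Int × Int × Int)) (out : String) : Decidable (Spec_solve n sx sy tx ty circles out) := by unfold Spec_solve; infer_instance

-- ===== CLAIM (what is proved, stated in full; the proofs are below) =====
def Claim_equal_solve : Prop := ∀ (n : Int) (sx : Int) (sy : Int) (tx : Int) (ty : Int) (circles : List (Int × Int × Int)), Dom_solve n sx sy tx ty circles → Pre_solve n sx sy tx ty circles → Spec_solve n sx sy tx ty circles (solve n sx sy tx ty circles)

-- ===== LEMMAS AND PROOFS =====

-- proof-side accessors: reach/visited bit k, adjacency list k (all real uses are in range)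
def gb (r : List Bool) (k : Nat) : Bool := r.getD k false
def gl (g : List (List Int)) (k : Nat) : List Int := g.getD k []

-- the touching relation both programs use, as a Prop on in-range distinct indices
def E (n : Int) (circles : List (Int × Int × Int)) (i j : Int) : Prop :=
  0 ≤ i ∧ i < n ∧ 0 ≤ j ∧ j < n ∧ i ≠ j ∧ touchB circles i j = true

theorem condA_eq_touchB (circles : List (Int × Int × Int)) (i j : Int) :
    condA circles i j = touchB circles i j := rfl

theorem touchB_comm (circles : List (Int × Int × Int)) (i j : Int) :
    touchB circles i j = touchB circles j i := by
  unfold touchB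
  cases h1 : PySem.List.pyGet? circles i with
  | none => cases h2 : PySem.List.pyGet? circles j with
    | none => rfl
    | some q => rfl
  | some p =>
    cases h2 : PySem.List.pyGet? circles j with
    | none => rfl
    | some q =>
      obtain ⟨a, b, c⟩ := p
      obtain ⟨d, e, f⟩ := q
      show decide ((c-f)^2 ≤ (a-d)^2+(b-e)^2 ∧ (a-d)^2+(b-e)^2 ≤ (c+f)^2)
         = decide ((f-c)^2 ≤ (d-a)^2+(e-b)^2 ∧ (d-a)^2+(e-b)^2 ≤ (f+c)^2)
      rw [show (c-f)^2 = (f-c)^2 by ring, show (c+f)^2 = (f+c)^2 by ring,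
          show (a-d)^2+(b-e)^2 = (d-a)^2+(e-b)^2 by ring]

-- ---- generic bit-array facts ----

theorem gb_pyGet (r : List Bool) (v : Int) (h0 : 0 ≤ v) :
    ((PySem.List.pyGet? r v).getD false) = gb r v.toNat := by
  rw [PySem.List.pyGet?_of_nonneg r h0]
  simp [gb, List.getD_eq_getElem?_getD]

theorem gb_set (r : List Bool) (k m : Nat) (hk : k < r.length) :
    gb (r.set k true) m = if m = k then true else gb r m := by
  by_cases hm : m = k
  · subst hm; simp [gb, List.getD_eq_getElem?_getD, hk]
  · have hm' : k ≠ m := fun h => hm h.symm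
    simp [gb, List.getD_eq_getElem?_getD, hm, hm']

theorem gb_replicate_set (nn s k : Nat) (hs : s < nn) :
    gb ((List.replicate nn false).set s true) k = decide (k = s) := by
  rw [gb_set _ _ _ (by simpa using hs)]
  by_cases hk : k = s
  · simp [hk]
  · simp only [hk, if_false]
    simp only [gb, List.getD_eq_getElem?_getD, List.getElem?_replicate]
    split <;> rfl

theorem count_true_set (r : List Bool) (k : Nat) (hk : k < r.length)
    (hf : gb r k = false) : (r.set k true).count true = r.count true + 1 := by
  induction r generalizing k with
  | nil => simp at hk
  | cons b t ih =>
    cases k with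
    | zero =>
      simp only [gb, List.getD_eq_getElem?_getD] at hf
      simp at hf
      simp [List.set, hf]
    | succ k =>
      have hk' : k < t.length := by simpa using hk
      have hf' : gb t k = false := by
        simpa [gb, List.getD_eq_getElem?_getD] using hf
      simp [List.set, List.count_cons, ih k hk' hf']
      omega

-- ===== graph construction (port A) =====

-- generic: a fold preserves an invariant of the accumulator
theorem foldl_pres {α β : Type} (L : List β) (f : α → β → α) (P : α → Prop)
    (g : α) (hg : P g) (h : ∀ a b, b ∈ L → P a → P (f a b)) : P (L.foldl f g) := by
  induction L generalizing g with
  | nil => exact hg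
  | cons x t ih =>
    exact ih (f g x) (h g x (by simp) hg) (fun a b hb ha => h a b (by simp [hb]) ha)

-- generic: evaluating a fold over a list split as L1 ++ x :: L2
theorem foldl_split {α β : Type} (L1 L2 : List β) (x : β) (F : α → β → α) (g : α) :
    (L1 ++ x :: L2).foldl F g = L2.foldl F (F (L1.foldl F g) x) := by
  simp [List.foldl_append]

theorem addEdge_length (g : List (List Int)) (i j : Int) :
    (addEdge g i j).length = g.length := by
  simp [addEdge, List.length_modify]

theorem gl_modify_append (g : List (List Int)) (t : Nat) (x : Int) (k : Nat) (v : Int) :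
    v ∈ gl (g.modify t (· ++ [x])) k ↔ v ∈ gl g k ∨ (k = t ∧ t < g.length ∧ v = x) := by
  simp only [gl, List.getD_eq_getElem?_getD, List.getElem?_modify]
  by_cases hkl : k < g.length
  · rw [List.getElem?_eq_getElem hkl]
    by_cases htk : t = k
    · subst htk
      simp [hkl]
    · have : k ≠ t := fun h => htk h.symm
      simp [htk, this]
  · rw [List.getElem?_eq_none (by omega)]
    simp
    omega

theorem gl_addEdge (g : List (List Int)) (i j : Int) (k : Nat) (v : Int) :
    v ∈ gl (addEdge g i j) k ↔ v ∈ gl g k ∨ (k = i.toNat ∧ i.toNat < g.length ∧ v = j)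
      ∨ (k = j.toNat ∧ j.toNat < g.length ∧ v = i) := by
  unfold addEdge
  rw [gl_modify_append, gl_modify_append]
  simp [List.length_modify]
  tauto

theorem gl_edgeStep_mono (circles : List (Int × Int × Int)) (i : Int)
    (g : List (List Int)) (j : Int) (k : Nat) (v : Int)
    (h : v ∈ gl g k) : v ∈ gl (edgeStep circles i g j) k := by
  unfold edgeStep
  split
  · exact h
  · split
    · exact (gl_addEdge g i j k v).2 (Or.inl h)
    · exact h

theorem gl_inner_mono (circles : List (Int × Int × Int)) (i : Int) (L : List Int)
    (g : List (List Int)) (k : Nat) (v : Int) (h : v ∈ gl g k) :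
    v ∈ gl (L.foldl (edgeStep circles i) g) k :=
  foldl_pres L _ (fun g => v ∈ gl g k) g h (fun a b _ ha => gl_edgeStep_mono circles i a b k v ha)

theorem gl_outer_mono (n : Int) (circles : List (Int × Int × Int)) (L : List Int)
    (g : List (List Int)) (k : Nat) (v : Int) (h : v ∈ gl g k) :
    v ∈ gl (L.foldl (fun g i => (PySem.List.pyRange 0 n 1).foldl (edgeStep circles i) g) g) k :=
  foldl_pres L _ (fun g => v ∈ gl g k) g h
    (fun a b _ ha => gl_inner_mono circles b _ a k v ha)

theorem inner_length (circles : List (Int × Int × Int)) (i : Int) (L : List Int)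
    (g : List (List Int)) : (L.foldl (edgeStep circles i) g).length = g.length := by
  refine foldl_pres L _ (fun g' => g'.length = g.length) g rfl ?_
  intro a b _ ha
  unfold edgeStep
  split
  · exact ha
  · split
    · rw [addEdge_length]; exact ha
    · exact ha

theorem buildGraph_length (n : Int) (circles : List (Int × Int × Int)) :
    (buildGraph n circles).length = n.toNat := by
  unfold buildGraph
  refine foldl_pres _ _ (fun (g : List (List Int)) => g.length = n.toNat) _ (by simp) ?_
  intro a b _ ha
  rw [inner_length]; exact ha

-- the soundness invariant of the graph-building loop
def GoodGraph (n : Int) (circles : List (Int × Int × Int)) (g : List (List Int)) : Prop :=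
  ∀ (k : Nat) (w : Int), w ∈ gl g k → ∃ i j : Int,
    (0 ≤ i ∧ i < n) ∧ (0 ≤ j ∧ j < n) ∧ i ≠ j ∧ condA circles i j = true ∧
    ((k = i.toNat ∧ w = j) ∨ (k = j.toNat ∧ w = i))

theorem goodGraph_build (n : Int) (circles : List (Int × Int × Int)) :
    GoodGraph n circles (buildGraph n circles) := by
  unfold buildGraph
  refine foldl_pres _ _ (GoodGraph n circles) _ ?_ ?_
  · intro k w hw
    exfalso
    simp only [gl, List.getD_eq_getElem?_getD] at hw
    rcases ho : (List.replicate n.toNat ([] : List Int))[k]? with _ | l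
    · rw [ho] at hw; simp at hw
    · rw [ho] at hw
      rcases List.getElem?_eq_some_iff.1 ho with ⟨hlt, hle⟩
      rw [List.getElem_replicate] at hle
      subst hle; simp at hw
  · intro a i hiL ha
    have hi := (PySem.List.mem_pyRange_one).1 hiL
    refine foldl_pres _ _ (GoodGraph n circles) _ ha ?_
    intro b j hjL hb k w hw
    have hj := (PySem.List.mem_pyRange_one).1 hjL
    unfold edgeStep at hw
    by_cases hij : i = j
    · rw [if_pos hij] at hw; exact hb k w hw
    · rw [if_neg hij] at hw
      by_cases hc : condA circles i j = true
      · rw [if_pos hc] at hw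
        rcases (gl_addEdge b i j k w).1 hw with h | ⟨hk, _, hwj⟩ | ⟨hk, _, hwi⟩
        · exact hb k w h
        · exact ⟨i, j, ⟨hi.1, hi.2⟩, ⟨hj.1, hj.2⟩, hij, hc, Or.inl ⟨hk, hwj⟩⟩
        · exact ⟨i, j, ⟨hi.1, hi.2⟩, ⟨hj.1, hj.2⟩, hij, hc, Or.inr ⟨hk, hwi⟩⟩
      · rw [if_neg hc] at hw; exact hb k w hw

theorem mem_buildGraph {n : Int} {circles : List (Int × Int × Int)} (u v : Int)
    (hu0 : 0 ≤ u) (hun : u < n) :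
    v ∈ gl (buildGraph n circles) u.toNat ↔ E n circles u v := by
  constructor
  · -- soundness: every recorded edge comes from a pair (i, j) the loop admitted
    intro hmem
    rcases goodGraph_build n circles u.toNat v hmem with ⟨i, j, hi, hj, hij, hc, hcase⟩
    rcases hcase with ⟨hk, hvj⟩ | ⟨hk, hvi⟩
    · have hui : u = i := by omega
      subst hui; subst hvj
      exact ⟨hu0, hun, hj.1, hj.2, hij, by rw [← condA_eq_touchB]; exact hc⟩
    · have huj : u = j := by omega
      subst huj; subst hvi
      refine ⟨hu0, hun, hi.1, hi.2, fun h => hij h.symm, ?_⟩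
      rw [touchB_comm, ← condA_eq_touchB]; exact hc
  · -- completeness: the loop iteration (i, j) = (u, v) records the edge, and edges persist
    rintro ⟨_, _, hv0, hvn, huv, ht⟩
    have hsplitU : ∀ (F : List (List Int) → Int → List (List Int)) init,
        (PySem.List.pyRange 0 n 1).foldl F init
          = (PySem.List.pyRange (u+1) n 1).foldl F (F ((PySem.List.pyRange 0 u 1).foldl F init) u) := by
      intro F init
      rw [PySem.List.pyRange_one_append 0 u n hu0 (by omega), PySem.List.pyRange_one_cons hun,
          foldl_split]
    have hsplitV : ∀ (F : List (List Int) → Int → List (List Int)) init,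
        (PySem.List.pyRange 0 n 1).foldl F init
          = (PySem.List.pyRange (v+1) n 1).foldl F (F ((PySem.List.pyRange 0 v 1).foldl F init) v) := by
      intro F init
      rw [PySem.List.pyRange_one_append 0 v n hv0 (by omega), PySem.List.pyRange_one_cons hvn,
          foldl_split]
    unfold buildGraph
    rw [hsplitU]
    apply gl_outer_mono
    rw [hsplitV (edgeStep circles u)]
    apply gl_inner_mono
    set g2 := (PySem.List.pyRange 0 v 1).foldl (edgeStep circles u)
      ((PySem.List.pyRange 0 u 1).foldl
        (fun g i => (PySem.List.pyRange 0 n 1).foldl (edgeStep circles i) g)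
        (List.replicate n.toNat ([] : List Int))) with hg2
    have hg2len : g2.length = n.toNat := by
      rw [hg2, inner_length]
      refine foldl_pres _ _ (fun (g : List (List Int)) => g.length = n.toNat) _ (by simp) ?_
      intro a b _ ha
      rw [inner_length]; exact ha
    show v ∈ gl (edgeStep circles u g2 v) u.toNat
    unfold edgeStep
    rw [if_neg huv, if_pos (by rw [condA_eq_touchB]; exact ht)]
    refine (gl_addEdge g2 u v u.toNat v).2 (Or.inr (Or.inl ⟨rfl, ?_, rfl⟩))
    rw [hg2len]; omega

-- ===== BFS (port A) correctness =====

theorem pyGet_getD_toNat {α : Type} (r : List α) (v : Int) (d : α) (h0 : 0 ≤ v) :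
    (PySem.List.pyGet? r v).getD d = r.getD v.toNat d := by
  rw [PySem.List.pyGet?_of_nonneg r h0]
  simp [List.getD_eq_getElem?_getD]

theorem rel_bounds {n : Int} {circles : List (Int × Int × Int)} {s u : Int}
    (hs : 0 ≤ s ∧ s < n) (h : Relation.ReflTransGen (E n circles) s u) : 0 ≤ u ∧ u < n := by
  induction h with
  | refl => exact hs
  | tail _ e _ => exact ⟨e.2.2.1, e.2.2.2.1⟩

theorem foldl_bfsStep_inl (t : Int) (L : List Int) (b : Bool) :
    L.foldl (bfsStep t) (Sum.inl b) = Sum.inl b := by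
  induction L with
  | nil => rfl
  | cons x xs ih => simpa [bfsStep] using ih

theorem foldl_bfsStep_goal (t : Int) (L : List Int) (htL : t ∈ L)
    (q : List Int) (vis : List Bool) :
    L.foldl (bfsStep t) (Sum.inr (q, vis)) = Sum.inl true := by
  induction L generalizing q vis with
  | nil => simp at htL
  | cons x xs ih =>
    rw [List.foldl_cons]
    by_cases hx : x = t
    · simp only [bfsStep, if_pos hx]
      exact foldl_bfsStep_inl t xs true
    · have htxs : t ∈ xs := by
        rcases List.mem_cons.1 htL with h | h
        · exact absurd h.symm hx
        · exact h
      simp only [bfsStep, if_neg hx]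
      split
      · exact ih htxs q vis
      · exact ih htxs (q ++ [x]) (vis.set x.toNat true)

theorem foldl_bfsStep_props (n t : Int) (L : List Int)
    (hL : ∀ v ∈ L, 0 ≤ v ∧ v < n) (htL : t ∉ L) :
    ∀ (q : List Int) (vis : List Bool), vis.length = n.toNat →
    ∃ q' vis', L.foldl (bfsStep t) (Sum.inr (q, vis)) = Sum.inr (q', vis') ∧
      vis'.length = n.toNat ∧
      (∀ k : Nat, gb vis k = true → gb vis' k = true) ∧
      (∀ v ∈ L, gb vis' v.toNat = true) ∧
      (∀ x ∈ q, x ∈ q') ∧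
      (∀ x ∈ q', x ∈ q ∨ x ∈ L) ∧
      (∀ k : Nat, gb vis' k = true → gb vis k = true ∨ (k : Int) ∈ q') ∧
      (∀ k : Nat, gb vis' k = true → gb vis k = true ∨ ∃ v ∈ L, v.toNat = k) ∧
      q'.length + 2 * vis.count true ≤ q.length + 2 * vis'.count true ∧
      vis.count true ≤ vis'.count true := by
  induction L with
  | nil =>
    intro q vis hlen
    exact ⟨q, vis, rfl, hlen, fun _ h => h, by simp, fun _ h => h, fun _ h => Or.inl h,
      fun _ h => Or.inl h, fun _ h => Or.inl h, by omega, le_refl _⟩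
  | cons v L ih =>
    intro q vis hlen
    have hv := hL v (by simp)
    have hvt : v ≠ t := fun h => htL (by simp [← h])
    have htL' : t ∉ L := fun h => htL (by simp [h])
    have hL' : ∀ w ∈ L, 0 ≤ w ∧ w < n := fun w hw => hL w (by simp [hw])
    rw [List.foldl_cons]
    simp only [bfsStep, if_neg hvt]
    rw [gb_pyGet vis v hv.1]
    by_cases hvis : gb vis v.toNat = true
    · rw [if_pos hvis]
      obtain ⟨q', vis', heq, h1, h2, h3, h4, h5, h6, h7, h8, h9⟩ := ih hL' htL' q vis hlen
      refine ⟨q', vis', heq, h1, h2, ?_, h4, ?_, h6, ?_, h8, h9⟩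
      · intro w hw
        rcases List.mem_cons.1 hw with h | h
        · subst h; exact h2 _ hvis
        · exact h3 w h
      · intro x hx
        rcases h5 x hx with h | h
        · exact Or.inl h
        · exact Or.inr (by simp [h])
      · intro k hk
        rcases h7 k hk with h | ⟨w, hw, hwk⟩
        · exact Or.inl h
        · exact Or.inr ⟨w, by simp [hw], hwk⟩
    · rw [if_neg hvis]
      have hvlt : v.toNat < vis.length := by rw [hlen]; omega
      have hlen2 : (vis.set v.toNat true).length = n.toNat := by simp [hlen]
      obtain ⟨q', vis', heq, h1, h2, h3, h4, h5, h6, h7, h8, h9⟩ :=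
        ih hL' htL' (q ++ [v]) (vis.set v.toNat true) hlen2
      have hcnt : (vis.set v.toNat true).count true = vis.count true + 1 :=
        count_true_set vis v.toNat hvlt (by simpa using hvis)
      have hmono : ∀ k : Nat, gb vis k = true → gb (vis.set v.toNat true) k = true := by
        intro k hk
        rw [gb_set vis v.toNat k hvlt]
        split <;> simp [hk]
      have hself : gb (vis.set v.toNat true) v.toNat = true := by
        rw [gb_set vis v.toNat v.toNat hvlt]; simp
      refine ⟨q', vis', heq, h1, fun k hk => h2 k (hmono k hk), ?_, ?_, ?_, ?_, ?_, ?_, ?_⟩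
      · intro w hw
        rcases List.mem_cons.1 hw with h | h
        · subst h; exact h2 _ hself
        · exact h3 w h
      · intro x hx; exact h4 x (by simp [hx])
      · intro x hx
        rcases h5 x hx with h | h
        · rcases List.mem_append.1 h with h' | h'
          · exact Or.inl h'
          · simp at h'; subst h'; exact Or.inr (by simp)
        · exact Or.inr (by simp [h])
      · intro k hk
        rcases h6 k hk with h | h
        · rw [gb_set vis v.toNat k hvlt] at h
          by_cases hkv : k = v.toNat
          · subst hkv
            refine Or.inr ?_
            have : (v.toNat : Int) = v := by omega
            rw [this]
            exact h4 v (by simp)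
          · rw [if_neg hkv] at h; exact Or.inl h
        · exact Or.inr h
      · intro k hk
        rcases h7 k hk with h | ⟨w, hw, hwk⟩
        · rw [gb_set vis v.toNat k hvlt] at h
          by_cases hkv : k = v.toNat
          · exact Or.inr ⟨v, by simp, hkv.symm⟩
          · rw [if_neg hkv] at h; exact Or.inl h
        · exact Or.inr ⟨w, by simp [hw], hwk⟩
      · simp only [List.length_append, List.length_singleton] at h8
        omega
      · omega

-- the loop invariant of A's BFS
def BfsInv (n : Int) (circles : List (Int × Int × Int)) (s t : Int)
    (q : List Int) (vis : List Bool) : Prop :=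
  vis.length = n.toNat ∧
  (∀ x ∈ q, 0 ≤ x ∧ x < n ∧ gb vis x.toNat = true) ∧
  gb vis s.toNat = true ∧
  (∀ k : Nat, (k : Int) < n → gb vis k = true →
    Relation.ReflTransGen (E n circles) s (k : Int)) ∧
  (∀ k : Nat, (k : Int) < n → gb vis k = true → (k : Int) ∉ q →
    ∀ v : Int, E n circles (k : Int) v → v ≠ t ∧ gb vis v.toNat = true)

theorem bfs_closed_no {n : Int} {circles : List (Int × Int × Int)} {s t : Int}
    {vis : List Bool} (hs : 0 ≤ s ∧ s < n)
    (hinv : BfsInv n circles s t [] vis) :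
    ¬ ∃ u, Relation.ReflTransGen (E n circles) s u ∧ E n circles u t := by
  obtain ⟨hlen, _, hsvis, hrel, hclosed⟩ := hinv
  have reach_vis : ∀ u, Relation.ReflTransGen (E n circles) s u →
      0 ≤ u ∧ u < n ∧ gb vis u.toNat = true := by
    intro u hu
    induction hu with
    | refl => exact ⟨hs.1, hs.2, hsvis⟩
    | @tail b c hb e ih =>
      refine ⟨e.2.2.1, e.2.2.2.1, ?_⟩
      have hcl := hclosed b.toNat (by omega) ih.2.2 (by simp) c ?_
      · exact hcl.2
      · have hcast : ((b.toNat : Nat) : Int) = b := by omega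
        rw [hcast]; exact e
  rintro ⟨u, hu, he⟩
  obtain ⟨hu0, hun, huvis⟩ := reach_vis u hu
  have := hclosed u.toNat (by omega) huvis (by simp) t ?_
  · exact this.1 rfl
  · have : ((u.toNat : Nat) : Int) = u := by omega
    rw [this]; exact he

theorem bfsLoop_iff (n : Int) (circles : List (Int × Int × Int)) (s t : Int)
    (hs : 0 ≤ s ∧ s < n) (ht : 0 ≤ t ∧ t < n) :
    ∀ (fuel : Nat) (q : List Int) (vis : List Bool), BfsInv n circles s t q vis →
    q.length + 2 * n.toNat ≤ fuel + 2 * vis.count true →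
    (bfsLoop (buildGraph n circles) t fuel q vis = true ↔
      ∃ u, Relation.ReflTransGen (E n circles) s u ∧ E n circles u t) := by
  intro fuel
  induction fuel with
  | zero =>
    intro q vis hinv hm
    have : vis.count true ≤ vis.length := List.count_le_length
    have hq : q = [] := by
      have := hinv.1
      have : q.length = 0 := by omega
      exact List.length_eq_zero_iff.1 this
    subst hq
    simp only [bfsLoop]
    exact iff_of_false (by simp) (bfs_closed_no hs hinv)
  | succ fuel ih =>
    intro q vis hinv hm
    match hq : q with
    | [] =>
      simp only [bfsLoop]
      exact iff_of_false (by simp) (bfs_closed_no hs hinv)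
    | u :: rest =>
      obtain ⟨hlen, hqb, hsvis, hrel, hclosed⟩ := hinv
      have hu := hqb u (by simp)
      have hrelu : Relation.ReflTransGen (E n circles) s u := by
        have := hrel u.toNat (by omega) hu.2.2
        have hcast : ((u.toNat : Nat) : Int) = u := by omega
        rwa [hcast] at this
      have hnbr : (PySem.List.pyGet? (buildGraph n circles) u).getD []
          = gl (buildGraph n circles) u.toNat := pyGet_getD_toNat _ u [] hu.1
      by_cases hgoal : t ∈ gl (buildGraph n circles) u.toNat
      · have : bfsLoop (buildGraph n circles) t (fuel+1) (u :: rest) vis = true := by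
          simp only [bfsLoop, hnbr]
          rw [foldl_bfsStep_goal t _ hgoal]
        rw [this]
        simp only [true_iff]
        exact ⟨u, hrelu, (mem_buildGraph u t hu.1 hu.2.1).1 hgoal⟩
      · have hLbound : ∀ v ∈ gl (buildGraph n circles) u.toNat, 0 ≤ v ∧ v < n := by
          intro v hv
          have := (mem_buildGraph u v hu.1 hu.2.1).1 hv
          exact ⟨this.2.2.1, this.2.2.2.1⟩
        obtain ⟨q', vis', heq, h1, h2, h3, h4, h5, h6, h7, h8, h9⟩ :=
          foldl_bfsStep_props n t _ hLbound hgoal rest vis hlen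
        have hstep : bfsLoop (buildGraph n circles) t (fuel+1) (u :: rest) vis
            = bfsLoop (buildGraph n circles) t fuel q' vis' := by
          simp only [bfsLoop, hnbr, heq]
        rw [hstep]
        refine ih q' vis' ⟨h1, ?_, h2 _ hsvis, ?_, ?_⟩ ?_
        · -- queue elements in range and visited
          intro x hx
          rcases h5 x hx with h | h
          · have := hqb x (by simp [h])
            exact ⟨this.1, this.2.1, h2 _ this.2.2⟩
          · have hE := (mem_buildGraph u x hu.1 hu.2.1).1 h
            exact ⟨hE.2.2.1, hE.2.2.2.1, h3 x h⟩
        · -- visited implies reachable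
          intro k hk hvk
          rcases h7 k hvk with h | ⟨v, hv, hvk'⟩
          · exact hrel k hk h
          · have hE := (mem_buildGraph u v hu.1 hu.2.1).1 hv
            have hv0 : 0 ≤ v := hE.2.2.1
            have hcast : ((k : Nat) : Int) = v := by omega
            rw [hcast]
            exact hrelu.tail hE
        · -- closedness outside the queue
          intro k hk hvk hkq v hE
          by_cases hku : (k : Int) = u
          · have hvnbr : v ∈ gl (buildGraph n circles) u.toNat := by
              refine (mem_buildGraph u v hu.1 hu.2.1).2 ?_
              rwa [hku] at hE
            constructor
            · intro hvt; subst hvt; exact hgoal hvnbr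
            · exact h3 v hvnbr
          · have hvisk : gb vis k = true := by
              rcases h6 k hvk with h | h
              · exact h
              · exact absurd h hkq
            have hkrest : (k : Int) ∉ (u :: rest) := by
              intro hmem
              rcases List.mem_cons.1 hmem with h | h
              · exact hku h
              · exact hkq (h4 _ h)
            have := hclosed k hk hvisk hkrest v hE
            exact ⟨this.1, h2 _ this.2⟩
        · -- fuel accounting
          have hqlen : (u :: rest).length = rest.length + 1 := by simp
          omega

theorem bfs_iff (n : Int) (circles : List (Int × Int × Int)) (s t : Int)
    (hs : 0 ≤ s ∧ s < n) (ht : 0 ≤ t ∧ t < n) :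
    (bfs s t (buildGraph n circles) = true ↔
      ∃ u, Relation.ReflTransGen (E n circles) s u ∧ E n circles u t) := by
  unfold bfs
  rw [buildGraph_length]
  have hsn : s.toNat < n.toNat := by omega
  have hvis0 : ∀ k : Nat, gb ((List.replicate n.toNat false).set s.toNat true) k
      = decide (k = s.toNat) := fun k => gb_replicate_set n.toNat s.toNat k hsn
  refine bfsLoop_iff n circles s t hs ht _ _ _ ⟨?_, ?_, ?_, ?_, ?_⟩ ?_
  · simp
  · intro x hx
    simp only [List.mem_singleton] at hx
    subst hx
    exact ⟨hs.1, hs.2, by rw [hvis0]; simp⟩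
  · rw [hvis0]; simp
  · intro k hk hvk
    rw [hvis0] at hvk
    have : k = s.toNat := by simpa using hvk
    have : (k : Int) = s := by omega
    rw [this]
  · intro k hk hvk hkq
    exfalso
    rw [hvis0] at hvk
    have : k = s.toNat := by simpa using hvk
    have : (k : Int) = s := by omega
    exact hkq (by simp [this])
  · have : ((List.replicate n.toNat false).set s.toNat true).count true ≥ 0 := by omega
    simp only [List.length_singleton]
    omega

-- ===== saturation (port B) correctness =====

-- the `changed` flag is monotone through any fold of satInner / of the round body
theorem satInner_ch_mono (circles : List (Int × Int × Int)) (i : Int) (L : List Int)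
    (st : List Bool × Bool) (h : st.2 = true) :
    (L.foldl (satInner circles i) st).2 = true := by
  refine foldl_pres L _ (fun st => st.2 = true) st h ?_
  intro a b _ ha
  unfold satInner
  split
  · rfl
  · exact ha

theorem satRound_ch_mono (n : Int) (circles : List (Int × Int × Int)) (L : List Int)
    (st : List Bool × Bool) (h : st.2 = true) :
    (L.foldl (fun st i =>
      if (PySem.List.pyGet? st.1 i).getD false then
        (PySem.List.pyRange 0 n 1).foldl (satInner circles i) st
      else st) st).2 = true := by
  refine foldl_pres L _ (fun st => st.2 = true) st h ?_
  intro a b _ ha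
  split
  · exact satInner_ch_mono circles b _ a ha
  · exact ha

-- a fold whose final `changed` flag is false did nothing at all
theorem satInner_nochange (circles : List (Int × Int × Int)) (i : Int) (L : List Int)
    (st : List Bool × Bool) (h : (L.foldl (satInner circles i) st).2 = false) :
    L.foldl (satInner circles i) st = st := by
  induction L generalizing st with
  | nil => rfl
  | cons x xs ih =>
    rw [List.foldl_cons] at h ⊢
    rcases Bool.eq_false_or_eq_true (satInner circles i st x).2 with hx | hx
    · rw [satInner_ch_mono circles i xs _ hx] at h
      simp at h
    · have hst : satInner circles i st x = st := by
        unfold satInner at hx ⊢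
        split at hx
        · simp at hx
        · rename_i hcond
          rw [if_neg hcond]
      rw [hst] at h ⊢
      exact ih st h

theorem satRound_nochange (n : Int) (circles : List (Int × Int × Int)) (L : List Int)
    (st : List Bool × Bool)
    (h : (L.foldl (fun st i =>
      if (PySem.List.pyGet? st.1 i).getD false then
        (PySem.List.pyRange 0 n 1).foldl (satInner circles i) st
      else st) st).2 = false) :
    L.foldl (fun st i =>
      if (PySem.List.pyGet? st.1 i).getD false then
        (PySem.List.pyRange 0 n 1).foldl (satInner circles i) st
      else st) st = st := by
  induction L generalizing st with
  | nil => rfl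
  | cons x xs ih =>
    rw [List.foldl_cons] at h ⊢
    set st1 := if (PySem.List.pyGet? st.1 x).getD false then
        (PySem.List.pyRange 0 n 1).foldl (satInner circles x) st
      else st with hst1
    rcases Bool.eq_false_or_eq_true st1.2 with hx | hx
    · rw [satRound_ch_mono n circles xs _ hx] at h
      simp at h
    · have hst : st1 = st := by
        rw [hst1] at hx ⊢
        split at hx
        · rename_i hguard
          rw [if_pos hguard]
          exact satInner_nochange circles x _ st hx
        · rename_i hguard
          rw [if_neg hguard]
      rw [hst] at h ⊢
      exact ih st h

-- basic bundle about one round started with changed = False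
theorem satRound_bundle (n : Int) (circles : List (Int × Int × Int)) (r : List Bool)
    (hlen : r.length = n.toNat) :
    (satRound n circles (r, false)).1.length = n.toNat ∧
    (∀ k : Nat, gb r k = true → gb (satRound n circles (r, false)).1 k = true) ∧
    ((satRound n circles (r, false)).2 = false → (satRound n circles (r, false)).1 = r) ∧
    ((satRound n circles (r, false)).2 = true →
      r.count true + 1 ≤ (satRound n circles (r, false)).1.count true) := by
  have main : (satRound n circles (r, false)).1.length = n.toNat ∧
      (∀ k : Nat, gb r k = true → gb (satRound n circles (r, false)).1 k = true) ∧
      (r.count true ≤ (satRound n circles (r, false)).1.count true) ∧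
      ((satRound n circles (r, false)).2 = true →
        r.count true + 1 ≤ (satRound n circles (r, false)).1.count true) := by
    unfold satRound
    have step : ∀ (st : List Bool × Bool) (j : Int), j ∈ PySem.List.pyRange 0 n 1 →
        (fun st => st.1.length = n.toNat ∧ (∀ k : Nat, gb r k = true → gb st.1 k = true) ∧
          r.count true ≤ st.1.count true ∧
          (st.2 = true → r.count true + 1 ≤ st.1.count true)) st →
        ∀ (i : Int),
        (fun st => st.1.length = n.toNat ∧ (∀ k : Nat, gb r k = true → gb st.1 k = true) ∧
          r.count true ≤ st.1.count true ∧
          (st.2 = true → r.count true + 1 ≤ st.1.count true)) (satInner circles i st j) := by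
      intro st j hjL hst i
      obtain ⟨hl, hmono, hcnt, hch⟩ := hst
      have hj := (PySem.List.mem_pyRange_one).1 hjL
      unfold satInner
      split
      · rename_i hcond
        have hjlt : j.toNat < st.1.length := by rw [hl]; omega
        have hfalse : gb st.1 j.toNat = false := by
          rcases hcond with ⟨_, hng, _⟩
          rw [gb_pyGet st.1 j hj.1] at hng
          simpa using hng
        have hcset := count_true_set st.1 j.toNat hjlt hfalse
        show (st.1.set j.toNat true).length = n.toNat ∧
          (∀ k : Nat, gb r k = true → gb (st.1.set j.toNat true) k = true) ∧
          r.count true ≤ (st.1.set j.toNat true).count true ∧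
          (true = true → r.count true + 1 ≤ (st.1.set j.toNat true).count true)
        refine ⟨by simp [hl], ?_, by simp [hcset]; omega, by intro _; simp [hcset]; omega⟩
        intro k hk
        rw [gb_set st.1 j.toNat k hjlt]
        split <;> simp [hmono k hk]
      · show st.1.length = n.toNat ∧
          (∀ k : Nat, gb r k = true → gb st.1 k = true) ∧
          r.count true ≤ st.1.count true ∧
          (st.2 = true → r.count true + 1 ≤ st.1.count true)
        exact ⟨hl, hmono, hcnt, hch⟩
    refine foldl_pres (PySem.List.pyRange 0 n 1)
      (fun (st : List Bool × Bool) (i : Int) =>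
        if (PySem.List.pyGet? st.1 i).getD false then
          (PySem.List.pyRange 0 n 1).foldl (satInner circles i) st
        else st)
      (fun (st : List Bool × Bool) => st.1.length = n.toNat ∧
        (∀ k : Nat, gb r k = true → gb st.1 k = true) ∧
        r.count true ≤ st.1.count true ∧
        (st.2 = true → r.count true + 1 ≤ st.1.count true))
      (r, false) ⟨hlen, fun _ h => h, le_refl _, by simp⟩ ?_
    intro a i _ ha
    dsimp only
    split
    · exact foldl_pres (PySem.List.pyRange 0 n 1) (satInner circles i)
        (fun (st : List Bool × Bool) => st.1.length = n.toNat ∧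
          (∀ k : Nat, gb r k = true → gb st.1 k = true) ∧
          r.count true ≤ st.1.count true ∧
          (st.2 = true → r.count true + 1 ≤ st.1.count true))
        a ha (fun st j hj hst => step st j hj hst i)
    · exact ha
  refine ⟨main.1, main.2.1, ?_, main.2.2.2⟩
  intro hch
  unfold satRound at hch ⊢
  exact congrArg Prod.fst (satRound_nochange n circles _ _ hch)

-- a round that reports no change left a set closed under the touching relation
theorem satRound_closed (n : Int) (circles : List (Int × Int × Int)) (r : List Bool)
    (h : (satRound n circles (r, false)).2 = false) :
    ∀ i j : Int, 0 ≤ i → i < n → 0 ≤ j → j < n → gb r i.toNat = true → j ≠ i →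
      touchB circles i j = true → gb r j.toNat = true := by
  intro i j hi0 hin hj0 hjn hri hji ht
  by_contra hrj
  set Fout := (fun (st : List Bool × Bool) (i : Int) =>
      if (PySem.List.pyGet? st.1 i).getD false then
        (PySem.List.pyRange 0 n 1).foldl (satInner circles i) st
      else st) with hFout
  have hsplitI : (PySem.List.pyRange 0 n 1).foldl Fout (r, false)
      = (PySem.List.pyRange (i+1) n 1).foldl Fout
          (Fout ((PySem.List.pyRange 0 i 1).foldl Fout (r, false)) i) := by
    conv_lhs => rw [PySem.List.pyRange_one_append 0 i n hi0 (by omega),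
      PySem.List.pyRange_one_cons hin]
    rw [foldl_split]
  unfold satRound at h
  rw [← hFout, hsplitI] at h
  set sti := (PySem.List.pyRange 0 i 1).foldl Fout (r, false) with hsti
  have hFi : (Fout sti i).2 = false := by
    rcases Bool.eq_false_or_eq_true (Fout sti i).2 with hF | hF
    · rw [satRound_ch_mono n circles _ _ hF] at h
      exact absurd h (by simp)
    · exact hF
  have hsti2 : sti.2 = false := by
    rcases Bool.eq_false_or_eq_true sti.2 with hF | hF
    · have : (Fout sti i).2 = true := by
        rw [hFout]
        dsimp only
        split
        · exact satInner_ch_mono circles i _ sti hF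
        · exact hF
      rw [this] at hFi
      exact absurd hFi (by simp)
    · exact hF
  have hstir : sti = (r, false) := by
    rw [hsti]
    exact satRound_nochange n circles _ _ (by rw [← hsti]; exact hsti2)
  rw [hstir] at hFi
  have hguard : (PySem.List.pyGet? (r, false).1 i).getD false = true := by
    show (PySem.List.pyGet? r i).getD false = true
    rw [gb_pyGet r i hi0]
    exact hri
  rw [hFout] at hFi
  dsimp only at hFi
  rw [if_pos hguard] at hFi
  -- now the inner loop over j, started from (r, false), reported no change
  have hsplitJ : (PySem.List.pyRange 0 n 1).foldl (satInner circles i) ((r : List Bool), false)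
      = (PySem.List.pyRange (j+1) n 1).foldl (satInner circles i)
          (satInner circles i ((PySem.List.pyRange 0 j 1).foldl (satInner circles i) (r, false)) j) := by
    conv_lhs => rw [PySem.List.pyRange_one_append 0 j n hj0 (by omega),
      PySem.List.pyRange_one_cons hjn]
    rw [foldl_split]
  rw [hsplitJ] at hFi
  set stj := (PySem.List.pyRange 0 j 1).foldl (satInner circles i) (r, false) with hstj
  have hFj : (satInner circles i stj j).2 = false := by
    rcases Bool.eq_false_or_eq_true (satInner circles i stj j).2 with hF | hF
    · rw [satInner_ch_mono circles i _ _ hF] at hFi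
      exact absurd hFi (by simp)
    · exact hF
  have hstj2 : stj.2 = false := by
    rcases Bool.eq_false_or_eq_true stj.2 with hF | hF
    · have : (satInner circles i stj j).2 = true := by
        unfold satInner
        split
        · rfl
        · exact hF
      rw [this] at hFj
      exact absurd hFj (by simp)
    · exact hF
  have hstjr : stj = (r, false) :=
    satInner_nochange circles i _ _ (by rw [← hstj]; exact hstj2)
  rw [hstjr] at hFj
  unfold satInner at hFj
  rw [if_pos ?_] at hFj
  · exact absurd hFj (by simp)
  · refine ⟨hji, ?_, ht⟩
    show ¬((PySem.List.pyGet? r j).getD false = true)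
    rw [gb_pyGet r j hj0]
    simp [hrj]

-- the saturation loop: its result contains the seed, is closed, and is sound
theorem satLoop_spec (n : Int) (circles : List (Int × Int × Int)) (s : Int) :
    ∀ (fuel : Nat) (r : List Bool), r.length = n.toNat →
      n.toNat < fuel + r.count true →
      (satLoop n circles fuel r).length = n.toNat ∧
      (∀ k : Nat, gb r k = true → gb (satLoop n circles fuel r) k = true) ∧
      (∀ i j : Int, 0 ≤ i → i < n → 0 ≤ j → j < n →
        gb (satLoop n circles fuel r) i.toNat = true → j ≠ i → touchB circles i j = true →
        gb (satLoop n circles fuel r) j.toNat = true) ∧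
      ((∀ k : Nat, (k : Int) < n → gb r k = true →
          Relation.ReflTransGen (E n circles) s (k : Int)) →
        ∀ k : Nat, (k : Int) < n → gb (satLoop n circles fuel r) k = true →
          Relation.ReflTransGen (E n circles) s (k : Int)) := by
  intro fuel
  induction fuel with
  | zero =>
    intro r hlen hcnt
    exfalso
    have : r.count true ≤ r.length := List.count_le_length
    omega
  | succ fuel ih =>
    intro r hlen hcnt
    obtain ⟨hb1, hb2, hb3, hb4⟩ := satRound_bundle n circles r hlen
    show _ ∧ _
    rcases hch : (satRound n circles (r, false)).2 with _ | _
    · -- no change: the loop stops and the result is r itself, which is closed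
      have hr' : (satRound n circles (r, false)).1 = r := hb3 hch
      have hout : satLoop n circles (fuel+1) r = r := by
        rcases hsr : satRound n circles (r, false) with ⟨r', ch⟩
        have hchf : ch = false := by rw [hsr] at hch; exact hch
        subst hchf
        rw [hsr] at hr'
        rw [satLoop, hsr]
        exact hr'
      rw [hout]
      exact ⟨hlen, fun _ h => h,
        fun i j hi0 hin hj0 hjn hgi hji ht =>
          satRound_closed n circles r hch i j hi0 hin hj0 hjn hgi hji ht,
        fun hbase k hk hgk => hbase k hk hgk⟩
    · -- a change happened: recurse on the strictly larger reach set
      have hout : satLoop n circles (fuel+1) r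
          = satLoop n circles fuel (satRound n circles (r, false)).1 := by
        rcases hsr : satRound n circles (r, false) with ⟨r', ch⟩
        have hcht : ch = true := by rw [hsr] at hch; exact hch
        subst hcht
        rw [satLoop, hsr]
        rfl
      have hcnt' : n.toNat < fuel + (satRound n circles (r, false)).1.count true := by
        have := hb4 hch
        omega
      obtain ⟨ih1, ih2, ih3, ih4⟩ := ih (satRound n circles (r, false)).1 hb1 hcnt'
      rw [hout]
      refine ⟨ih1, fun k hk => ih2 k (hb2 k hk), ih3, ?_⟩
      intro hbase
      refine ih4 ?_
      -- soundness carries over one round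
      intro k hk hgk
      -- every bit set by the round is reachable
      have hsound : ∀ k : Nat, (k : Int) < n →
          gb (satRound n circles (r, false)).1 k = true →
          Relation.ReflTransGen (E n circles) s (k : Int) := by
        have main := foldl_pres (PySem.List.pyRange 0 n 1)
          (fun (st : List Bool × Bool) (i : Int) =>
            if (PySem.List.pyGet? st.1 i).getD false then
              (PySem.List.pyRange 0 n 1).foldl (satInner circles i) st
            else st)
          (fun (st : List Bool × Bool) => st.1.length = n.toNat ∧
            ∀ k : Nat, (k : Int) < n → gb st.1 k = true →
              Relation.ReflTransGen (E n circles) s (k : Int))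
          ((r : List Bool), false) ⟨hlen, hbase⟩ ?_
        · exact fun k hk hgk => (main.2) k hk hgk
        · intro a i hiL ha
          dsimp only
          split
          · rename_i hguard
            have hi := (PySem.List.mem_pyRange_one).1 hiL
            have hreli : Relation.ReflTransGen (E n circles) s i := by
              have := ha.2 i.toNat (by omega) ?_
              · have hcast : ((i.toNat : Nat) : Int) = i := by omega
                rwa [hcast] at this
              · rw [← gb_pyGet a.1 i hi.1]
                exact hguard
            refine foldl_pres _ _ (fun (st : List Bool × Bool) => st.1.length = n.toNat ∧
              ∀ k : Nat, (k : Int) < n → gb st.1 k = true →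
                Relation.ReflTransGen (E n circles) s (k : Int)) a ha ?_
            intro b j hjL hb
            have hj := (PySem.List.mem_pyRange_one).1 hjL
            unfold satInner
            split
            · rename_i hcond
              have hjlt : j.toNat < b.1.length := by rw [hb.1]; omega
              refine ⟨by simp [hb.1], ?_⟩
              intro k hk hgk
              rw [gb_set b.1 j.toNat k hjlt] at hgk
              by_cases hkj : k = j.toNat
              · have hcast : ((k : Nat) : Int) = j := by omega
                rw [hcast]
                exact hreli.tail ⟨hi.1, hi.2, hj.1, hj.2, fun he => hcond.1 he.symm, hcond.2.2⟩
              · rw [if_neg hkj] at hgk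
                exact hb.2 k hk hgk
            · exact hb
          · exact ha
      exact hsound k hk hgk

-- characterisation of Source B's reach array
theorem reach_iff (n : Int) (circles : List (Int × Int × Int)) (s : Int)
    (hs : 0 ≤ s ∧ s < n) :
    ∀ u : Int, 0 ≤ u → u < n →
      (gb (satLoop n circles (n.toNat + 1)
            ((List.replicate n.toNat false).set s.toNat true)) u.toNat = true ↔
        Relation.ReflTransGen (E n circles) s u) := by
  have hsn : s.toNat < n.toNat := by omega
  have hlen0 : ((List.replicate n.toNat false).set s.toNat true).length = n.toNat := by simp
  have hvis0 : ∀ k : Nat, gb ((List.replicate n.toNat false).set s.toNat true) k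
      = decide (k = s.toNat) := fun k => gb_replicate_set n.toNat s.toNat k hsn
  obtain ⟨h1, h2, h3, h4⟩ := satLoop_spec n circles s (n.toNat + 1)
    ((List.replicate n.toNat false).set s.toNat true) hlen0 (by omega)
  intro u hu0 hun
  constructor
  · intro hg
    have := h4 ?_ u.toNat (by omega) hg
    · have hcast : ((u.toNat : Nat) : Int) = u := by omega
      rwa [hcast] at this
    · intro k hk hgk
      rw [hvis0] at hgk
      have : k = s.toNat := by simpa using hgk
      have : (k : Int) = s := by omega
      rw [this]
  · intro hrel
    induction hrel with
    | refl =>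
      refine h2 s.toNat ?_
      rw [hvis0]; simp
    | @tail b c hb e ihb =>
      have hbb := rel_bounds hs hb
      have := h3 b c hbb.1 hbb.2 e.2.2.1 e.2.2.2.1 (ihb hbb.1 hbb.2) ?_ ?_
      · exact this
      · exact fun he => e.2.2.2.2.1 he.symm
      · exact e.2.2.2.2.2

-- ===== the final equivalence =====

theorem scan_none (sx sy tx ty : Int) (circles : List (Int × Int × Int)) (L : List Int) :
    L.foldl (scanStep sx sy tx ty circles) none = none := by
  induction L with
  | nil => rfl
  | cons x xs ih => simpa [scanStep] using ih

theorem scan_shape (sx sy tx ty : Int) (circles : List (Int × Int × Int)) :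
    ∀ (L : List Int) (a b : Option Int),
      L.foldl (scanStep sx sy tx ty circles) (some (a, b)) = none ∨
      ∃ p q, L.foldl (scanStep sx sy tx ty circles) (some (a, b)) = some (p, q) ∧
        (p = a ∨ ∃ i ∈ L, p = some i) ∧ (q = b ∨ ∃ i ∈ L, q = some i) := by
  intro L
  induction L with
  | nil =>
    intro a b
    exact Or.inr ⟨a, b, rfl, Or.inl rfl, Or.inl rfl⟩
  | cons x xs ih =>
    intro a b
    rw [List.foldl_cons]
    rcases hc : PySem.List.pyGet? circles x with _ | ⟨cx, cy, cr⟩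
    · have hstep : scanStep sx sy tx ty circles (some (a, b)) x = none := by
        unfold scanStep
        rw [hc]
      rw [hstep, scan_none]
      exact Or.inl rfl
    · have hstep : scanStep sx sy tx ty circles (some (a, b)) x
          = some ((if (sx-cx)^2+(sy-cy)^2 = cr^2 then some x else a),
                  (if (tx-cx)^2+(ty-cy)^2 = cr^2 then some x else b)) := by
        unfold scanStep
        rw [hc]
      rw [hstep]
      rcases ih _ _ with hnone | ⟨p, q, heq, hp, hq⟩
      · exact Or.inl hnone
      · refine Or.inr ⟨p, q, heq, ?_, ?_⟩
        · rcases hp with hp | ⟨i, hi, hpi⟩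
          · rw [hp]
            split
            · exact Or.inr ⟨x, by simp, rfl⟩
            · exact Or.inl rfl
          · exact Or.inr ⟨i, by simp [hi], hpi⟩
        · rcases hq with hq | ⟨i, hi, hqi⟩
          · rw [hq]
            split
            · exact Or.inr ⟨x, by simp, rfl⟩
            · exact Or.inl rfl
          · exact Or.inr ⟨i, by simp [hi], hqi⟩

theorem solve_eq_alt (n sx sy tx ty : Int) (circles : List (Int × Int × Int)) :
    solve n sx sy tx ty circles = solve_alt n sx sy tx ty circles := by
  unfold solve solve_alt
  by_cases hn : n = 1
  · rw [if_pos hn, if_pos hn]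
  · rw [if_neg hn, if_neg hn]
    rcases hscan : scanSG n sx sy tx ty circles with _ | ⟨p, q⟩
    · rfl
    · rcases p with _ | s
      · rcases q with _ | t <;> rfl
      · rcases q with _ | t
        · rfl
        · -- the real case: both a start and a goal index were found
          have hshape := scan_shape sx sy tx ty circles (PySem.List.pyRange 0 n 1) none none
          have hscan' : (PySem.List.pyRange 0 n 1).foldl
              (scanStep sx sy tx ty circles) (some (none, none)) = some (some s, some t) := hscan
          rcases hshape with hnone | ⟨p', q', heq, hp, hq⟩
          · rw [hscan'] at hnone
            exact absurd hnone (by simp)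
          · rw [hscan'] at heq
            obtain ⟨hps, hqt⟩ : some s = p' ∧ some t = q' := by
              have := Option.some.inj heq
              exact ⟨congrArg Prod.fst this, congrArg Prod.snd this⟩
            have hs : 0 ≤ s ∧ s < n := by
              rcases hp with hp | ⟨i, hiL, hpi⟩
              · rw [hp] at hps; exact absurd hps (by simp)
              · rw [hpi] at hps
                have : s = i := Option.some.inj hps
                subst this
                exact (PySem.List.mem_pyRange_one).1 hiL
            have ht : 0 ≤ t ∧ t < n := by
              rcases hq with hq | ⟨i, hiL, hqi⟩
              · rw [hq] at hqt; exact absurd hqt (by simp)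
              · rw [hqi] at hqt
                have : t = i := Option.some.inj hqt
                subst this
                exact (PySem.List.mem_pyRange_one).1 hiL
            -- both sides decide exactly: is there an edge into `goal` from a vertex
            -- reachable from `start`?
            have h1 := bfs_iff n circles s t hs ht
            have h2 : ((PySem.List.pyRange 0 n 1).any fun u =>
                (PySem.List.pyGet? (satLoop n circles (n.toNat + 1)
                  ((List.replicate n.toNat false).set s.toNat true)) u).getD false
                  && decide (u ≠ t) && touchB circles u t) = true
                ↔ ∃ u, Relation.ReflTransGen (E n circles) s u ∧ E n circles u t := by
              rw [List.any_eq_true]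
              constructor
              · rintro ⟨u, huL, hpred⟩
                have hu := (PySem.List.mem_pyRange_one).1 huL
                simp only [Bool.and_eq_true, decide_eq_true_eq] at hpred
                obtain ⟨⟨hg, hne⟩, ht'⟩ := hpred
                rw [gb_pyGet _ u hu.1] at hg
                exact ⟨u, (reach_iff n circles s hs u hu.1 hu.2).1 hg,
                  ⟨hu.1, hu.2, ht.1, ht.2, hne, ht'⟩⟩
              · rintro ⟨u, hrel, he⟩
                have hu := rel_bounds hs hrel
                refine ⟨u, (PySem.List.mem_pyRange_one).2 ⟨hu.1, hu.2⟩, ?_⟩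
                simp only [Bool.and_eq_true, decide_eq_true_eq]
                exact ⟨⟨by rw [gb_pyGet _ u hu.1]
                           exact (reach_iff n circles s hs u hu.1 hu.2).2 hrel,
                  he.2.2.2.2.1⟩, he.2.2.2.2.2⟩
            have hcond : bfs s t (buildGraph n circles)
                = ((PySem.List.pyRange 0 n 1).any fun u =>
                    (PySem.List.pyGet? (satLoop n circles (n.toNat + 1)
                      ((List.replicate n.toNat false).set s.toNat true)) u).getD false
                      && decide (u ≠ t) && touchB circles u t) :=
              Bool.coe_iff_coe.mp (h1.trans h2.symm)
            show (if bfs s t (buildGraph n circles) then "Yes" else "No") = _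
            rw [hcond]

-- ===== VERDICT (by name: the statement is the Claim_ definition above) =====
theorem solve_spec : Claim_equal_solve := by
  intro n sx sy tx ty circles _ _
  unfold Spec_solve
  exact solve_eq_alt n sx sy tx ty circles
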